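-- pv_equiv track=rewrite | github.com/DorusKeijzer/TicTacToe-TD-learning | tictactoegame.py | _decimal_to_tic_tac_toe
-- ===== SOURCE A (Python) =====
-- def _decimal_to_tic_tac_toe(index):
--     if index < 0 or index >= 3**9:
--         raise ValueError("Index out of range. Must be between 0 and 19682.")
--
--     # Convert index to a base-3 (ternary) representation
--     ternary = ""
--     for _ in range(9):
--         ternary = str(index % 3) + ternary
--         index //= 3
--
--     # Map ternary digits to Tic-Tac-Toe symbols
--     board = []
--     symbol_map = {'0': ' ', '1': 'x', '2': 'o'}
--     for i in range(0, 9, 3):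
--         row = [symbol_map[ternary[j]] for j in range(i, i + 3)]
--         board.append(row)
--     return board
-- ===== SOURCE B (Python) =====
-- def _decimal_to_tic_tac_toe(index):
--     if index < 0 or index >= 3**9:
--         raise ValueError("Index out of range. Must be between 0 and 19682.")
--     symbols = (' ', 'x', 'o')
--     return [[symbols[(index // 3**(8 - (3*r + c))) % 3] for c in range(3)]
--             for r in range(3)]
-- ===== Notes on version B (the rewrite author's own statement) =====
-- stated objective: simpler
-- what changed: Drops A's intermediate ternary string and its string-keyed symbol dict: B computes each cell directly with the closed form (index // 3**(8-(3*r+c))) % 3 in a double comprehension over rows and columns, indexing a symbol tuple.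
import Mathlib
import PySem

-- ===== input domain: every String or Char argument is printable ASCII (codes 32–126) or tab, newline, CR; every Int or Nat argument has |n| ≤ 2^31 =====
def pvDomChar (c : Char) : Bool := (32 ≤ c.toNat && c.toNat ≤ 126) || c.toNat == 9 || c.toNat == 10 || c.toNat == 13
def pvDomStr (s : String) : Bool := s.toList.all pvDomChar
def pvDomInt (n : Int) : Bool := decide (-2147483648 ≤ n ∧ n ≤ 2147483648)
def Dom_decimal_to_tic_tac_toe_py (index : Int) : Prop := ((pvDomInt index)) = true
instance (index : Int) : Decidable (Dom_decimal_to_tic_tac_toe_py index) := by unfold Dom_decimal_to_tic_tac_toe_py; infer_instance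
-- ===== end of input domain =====

-- B replaces A's ternary-string-plus-dict construction by a direct closed-form fill of each cell (simpler);
-- the out-of-range indices on which both raise ValueError are excluded by Pre_.

-- ===== PORT A =====
-- A: build a 9-char ternary string by repeated prepend of str(index % 3), then map its chars
-- through the dict {'0':' ','1':'x','2':'o'} row by row. String kept as List Char (PySem.Chars side).
def decimal_to_tic_tac_toe_py (index : Int) : List (List String) :=
  let st := (PySem.List.pyRange 0 9 1).foldl
      (fun (st : List Char × Int) _ =>
        (PySem.Int.toChars (PySem.Int.mod st.2 3) ++ st.1, PySem.Int.floordiv st.2 3))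
      ([], index)
  let ternary := st.1
  let symbol_map : PySem.Dict String String := PySem.Dict.ofList [("0", " "), ("1", "x"), ("2", "o")]
  (PySem.List.pyRange 0 9 3).foldl
    (fun board i =>
      board ++ [(PySem.List.pyRange i (i + 3) 1).map
        (fun j => (symbol_map.get? (String.mk [PySem.List.pyGetD ternary j ' '])).getD "")])
    []
  -- ternary[j] is always in range and symbol_map always has the key under Pre_, so the defaults never fire

-- ===== PORT B =====
def decimal_to_tic_tac_toe_py_alt (index : Int) : List (List String) :=
  (PySem.List.pyRange 0 3 1).map (fun r =>
    (PySem.List.pyRange 0 3 1).map (fun c =>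
      PySem.List.pyGetD [" ", "x", "o"]
        (PySem.Int.mod (PySem.Int.floordiv index ((3 : Int) ^ ((8 - (3 * r + c)).toNat))) 3) " "))

-- ===== PRECONDITION & SPEC =====
-- Pre_ excludes exactly the out-of-range indices on which A (and B) raise ValueError (negative or too large).
def Pre_decimal_to_tic_tac_toe_py (index : Int) : Prop := 0 ≤ index ∧ index < 19683
instance (index : Int) : Decidable (Pre_decimal_to_tic_tac_toe_py index) := by unfold Pre_decimal_to_tic_tac_toe_py; infer_instance
def pvWitness_decimal_to_tic_tac_toe_py : Int := 42

def Spec_decimal_to_tic_tac_toe_py (index : Int) (out : List (List String)) : Prop := out = decimal_to_tic_tac_toe_py_alt index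
instance (index : Int) (out : List (List String)) : Decidable (Spec_decimal_to_tic_tac_toe_py index out) := by unfold Spec_decimal_to_tic_tac_toe_py; infer_instance

-- ===== CLAIM (what is proved, stated in full; the proofs are below) =====
def Claim_equal_decimal_to_tic_tac_toe_py : Prop := ∀ (index : Int), Dom_decimal_to_tic_tac_toe_py index → Pre_decimal_to_tic_tac_toe_py index → Spec_decimal_to_tic_tac_toe_py index (decimal_to_tic_tac_toe_py index)

-- ===== LEMMAS AND PROOFS =====

-- str(x % 3) is a single digit character
lemma toChars_mod3 (x : Int) :
    PySem.Int.toChars (PySem.Int.mod x 3) = [Char.ofNat (48 + (PySem.Int.mod x 3).toNat)] := by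
  have h0 : 0 ≤ PySem.Int.mod x 3 := PySem.Int.mod_nonneg x (by norm_num)
  have h3 : PySem.Int.mod x 3 < 3 := PySem.Int.mod_lt x (by norm_num)
  set m := PySem.Int.mod x 3 with hm
  interval_cases m <;> decide

-- one cell: A's dict lookup of the digit character equals B's tuple indexing of the digit
lemma cell_eq (x : Int) :
    ((PySem.Dict.ofList [("0", " "), ("1", "x"), ("2", "o")] : PySem.Dict String String).get?
        (String.mk [Char.ofNat (48 + (x % 3).toNat)])).getD ""
      = PySem.List.pyGetD [" ", "x", "o"] (x % 3) " " := by
  have h0 : 0 ≤ x % 3 := Int.emod_nonneg x (by norm_num)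
  have h3 : x % 3 < 3 := Int.emod_lt_of_pos x (by norm_num)
  set m := x % 3 with hm
  interval_cases m <;> decide

-- iterated //3 collapses to //3^k
lemma fdfd (i a b : Int) (ha : 0 < a) (hb : 0 < b) :
    PySem.Int.floordiv (PySem.Int.floordiv i a) b = PySem.Int.floordiv i (a * b) := by
  rw [PySem.Int.floordiv_eq_ediv_of_pos ha, PySem.Int.floordiv_eq_ediv_of_pos hb,
      PySem.Int.floordiv_eq_ediv_of_pos (mul_pos ha hb)]
  exact Int.ediv_ediv_of_nonneg ha.le

-- ===== VERDICT (by name: the statement is the Claim_ definition above) =====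
theorem decimal_to_tic_tac_toe_py_spec : Claim_equal_decimal_to_tic_tac_toe_py := by
  intro index _ _
  unfold Spec_decimal_to_tic_tac_toe_py decimal_to_tic_tac_toe_py decimal_to_tic_tac_toe_py_alt
  simp only [show PySem.List.pyRange 0 9 1 = [0,1,2,3,4,5,6,7,8] from by decide,
             show PySem.List.pyRange 0 9 3 = [0,3,6] from by decide,
             show PySem.List.pyRange 0 3 1 = [0,1,2] from by decide,
             show PySem.List.pyRange 0 (0+3) 1 = [0,1,2] from by decide,
             show PySem.List.pyRange 3 (3+3) 1 = [3,4,5] from by decide,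
             show PySem.List.pyRange 6 (6+3) 1 = [6,7,8] from by decide,
             List.foldl, List.map, toChars_mod3, List.nil_append,
             List.cons_append]
  simp only [fdfd _ 3 3 (by norm_num) (by norm_num)]
  norm_num [PySem.List.pyGetD_ofNat']
  simp only [Int.ediv_ediv_of_nonneg (show (0:ℤ) ≤ 9 by norm_num)]
  norm_num [cell_eq]
  simp only [Int.ediv_ediv_of_nonneg (show (0:ℤ) ≤ 81 by norm_num)]
  norm_num [show Int.toNat 8 = 8 from rfl, show Int.toNat 7 = 7 from rfl,
            show Int.toNat 6 = 6 from rfl, show Int.toNat 5 = 5 from rfl,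
            show Int.toNat 4 = 4 from rfl, show Int.toNat 3 = 3 from rfl,
            show Int.toNat 2 = 2 from rfl]
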